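-- pv_equiv track=rewrite | github.com/Qian23333/3Dmigoto-mods-merger | 3dm_merge_mods_cn.py | process_ini_content
-- ===== SOURCE A (Python) =====
-- def process_ini_content(original_content, character_name, namespace, remove_hash=False):
--     """
--     Process ini content with various transformations.
--     Returns processed content as string.
--     """
--     lines = [f"namespace = {character_name}\\{namespace}\n"]
--
--     # Process each line
--     inside_override_section = False
--
--     for line in original_content.splitlines(keepends=True):
--         stripped = line.strip().lower()
--         is_texture_override = stripped.startswith('[textureoverride')
--         is_shader_override = stripped.startswith('[shaderoverride')
--
--         # Check if we're entering a new section
--         if stripped.startswith('['):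
--             if is_texture_override or is_shader_override:
--                 inside_override_section = True
--             else:
--                 inside_override_section = False
--
--         # Skip hash/match_first_index/filter_index lines if requested AND we're inside an override section
--         skip_keys = ['hash', 'match_first_index', 'filter_index', 'match_priority', 'allow_duplicate_hash']
--         if (remove_hash and inside_override_section and
--             any(stripped.startswith(key) and '=' in stripped for key in skip_keys)):
--             continue
--
--         # Convert Override to CommandList
--         if is_texture_override or is_shader_override:
--             original_section_name = line.strip()[1:-1]
--             lines.append(f"[CommandList{original_section_name}]\n")
--         else:
--             lines.append(line)
--
--     return ''.join(lines)
-- ===== SOURCE B (Python) =====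
-- # Two-phase rewrite: partition the lines into a preamble and (header, body) sections
-- # first, then emit each section once; same return value as the one-pass original.
-- SKIP_KEYS = ('hash', 'match_first_index', 'filter_index', 'match_priority', 'allow_duplicate_hash')
--
--
-- def _is_header(line):
--     return line.strip().lower().startswith('[')
--
--
-- def _is_override(line):
--     s = line.strip().lower()
--     return s.startswith('[textureoverride') or s.startswith('[shaderoverride')
--
--
-- def _is_skip(line):
--     s = line.strip().lower()
--     return any(s.startswith(k) and '=' in s for k in SKIP_KEYS)
--
--
-- def process_ini_content(original_content, character_name, namespace, remove_hash=False):
--     # Phase 1: partition into preamble lines and (header, body) sections.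
--     preamble, done, cur = [], [], None
--     for line in original_content.splitlines(keepends=True):
--         if _is_header(line):
--             if cur is not None:
--                 done.append(cur)
--             cur = (line, [])
--         elif cur is None:
--             preamble.append(line)
--         else:
--             cur[1].append(line)
--     if cur is not None:
--         done.append(cur)
--
--     # Phase 2: emit.
--     out = [f"namespace = {character_name}\\{namespace}\n"]
--     out.extend(preamble)
--     for header, body in done:
--         if _is_override(header):
--             out.append(f"[CommandList{header.strip()[1:-1]}]\n")
--             if remove_hash:
--                 body = [l for l in body if not _is_skip(l)]
--             out.extend(body)
--         else:
--             out.append(header)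
--             out.extend(body)
--     return ''.join(out)
-- ===== Notes on version B (the rewrite author's own statement) =====
-- stated objective: alternative
-- what changed: Replaces A's single stateful loop (carrying an inside_override_section flag across all lines) with a two-phase pass: first partition the keepends-split lines into a preamble and (header, body) sections, then emit each section once, deciding the override rewrite and the hash-line filter per section instead of per line.
import Mathlib
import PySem

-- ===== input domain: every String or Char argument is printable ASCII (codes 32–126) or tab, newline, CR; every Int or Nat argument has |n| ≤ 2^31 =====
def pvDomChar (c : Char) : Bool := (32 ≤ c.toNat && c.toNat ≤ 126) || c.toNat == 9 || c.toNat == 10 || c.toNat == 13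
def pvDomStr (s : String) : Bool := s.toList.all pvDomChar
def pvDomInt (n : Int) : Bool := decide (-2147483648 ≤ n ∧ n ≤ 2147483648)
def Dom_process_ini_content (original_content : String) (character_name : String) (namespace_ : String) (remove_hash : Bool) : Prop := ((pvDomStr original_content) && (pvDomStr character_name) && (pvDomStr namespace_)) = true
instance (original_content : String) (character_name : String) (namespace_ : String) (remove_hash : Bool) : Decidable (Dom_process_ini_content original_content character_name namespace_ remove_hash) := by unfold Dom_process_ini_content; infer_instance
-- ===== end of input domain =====

-- B restructures A's single stateful loop into two phases (partition into preamble +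
-- (header, body) sections, then emit each section once); same return value (objective: alternative).

-- Shared primitive: Python's str.splitlines(keepends=True), exact on the domain's
-- line-break characters ('\n', '\r', '\r\n'; no other splitlines terminator is in Dom).
def pvSplitKeep : List Char → List (List Char)
  | [] => []
  | '\r' :: '\n' :: rest => ['\r', '\n'] :: pvSplitKeep rest
  | '\n' :: rest => ['\n'] :: pvSplitKeep rest
  | '\r' :: rest => ['\r'] :: pvSplitKeep rest
  | c :: rest =>
      match pvSplitKeep rest with
      | [] => [[c]]
      | l :: ls => (c :: l) :: ls

-- f"namespace = {character_name}\\{namespace}\n" (shared literal f-string port)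
def pvNsLine (character_name namespace_ : String) : List Char :=
  "namespace = ".toList ++ character_name.toList ++ "\\".toList ++ namespace_.toList ++ "\n".toList

def pvSkipKeys : List (List Char) :=
  ["hash".toList, "match_first_index".toList, "filter_index".toList,
   "match_priority".toList, "allow_duplicate_hash".toList]

-- ===== PORT A =====
-- A's loop over the lines, carrying inside_override_section and the accumulated lines.
def pvALoop (remove_hash : Bool) : List (List Char) → Bool → List (List Char) → List (List Char)
  | [], _, acc => acc
  | line :: rest, inside, acc =>
    let stripped := PySem.Chars.lower (PySem.Chars.strip line)
    let is_texture_override := PySem.Chars.startswith stripped "[textureoverride".toList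
    let is_shader_override := PySem.Chars.startswith stripped "[shaderoverride".toList
    let inside' := if PySem.Chars.startswith stripped "[".toList
                   then (is_texture_override || is_shader_override) else inside
    if remove_hash && inside' &&
        pvSkipKeys.any (fun key => PySem.Chars.startswith stripped key && PySem.Chars.isIn ['='] stripped) then
      pvALoop remove_hash rest inside' acc
    else if is_texture_override || is_shader_override then
      pvALoop remove_hash rest inside'
        (acc ++ ["[CommandList".toList ++ PySem.List.slice (PySem.Chars.strip line) (some 1) (some (-1)) ++ "]\n".toList])
    else
      pvALoop remove_hash rest inside' (acc ++ [line])

def process_ini_content (original_content : String) (character_name : String) (namespace_ : String) (remove_hash : Bool) : String :=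
  String.ofList (PySem.Chars.join []
    (pvALoop remove_hash (pvSplitKeep original_content.toList) false [pvNsLine character_name namespace_]))

-- ===== PORT B =====
def pvStrippedL (line : List Char) : List Char := PySem.Chars.lower (PySem.Chars.strip line)

def pvIsHeader (line : List Char) : Bool := PySem.Chars.startswith (pvStrippedL line) "[".toList

def pvIsOverride (line : List Char) : Bool :=
  PySem.Chars.startswith (pvStrippedL line) "[textureoverride".toList ||
  PySem.Chars.startswith (pvStrippedL line) "[shaderoverride".toList

def pvIsSkip (line : List Char) : Bool :=
  pvSkipKeys.any (fun k => PySem.Chars.startswith (pvStrippedL line) k && PySem.Chars.isIn ['='] (pvStrippedL line))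

-- Phase 1 step: state = (preamble, finished sections, current open section).
def pvPartStep
    (st : List (List Char) × List ((List Char) × List (List Char)) × Option ((List Char) × List (List Char)))
    (line : List Char) :
    List (List Char) × List ((List Char) × List (List Char)) × Option ((List Char) × List (List Char)) :=
  if pvIsHeader line then
    (st.1, st.2.1 ++ (match st.2.2 with | none => [] | some c => [c]), some (line, []))
  else
    match st.2.2 with
    | none => (st.1 ++ [line], st.2.1, none)
    | some (h, b) => (st.1, st.2.1, some (h, b ++ [line]))

-- Phase 2: emit one section.
def pvEmitSec (remove_hash : Bool) (sec : (List Char) × List (List Char)) : List (List Char) :=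
  if pvIsOverride sec.1 then
    ("[CommandList".toList ++ PySem.List.slice (PySem.Chars.strip sec.1) (some 1) (some (-1)) ++ "]\n".toList)
      :: (if remove_hash then sec.2.filter (fun l => !pvIsSkip l) else sec.2)
  else sec.1 :: sec.2

def process_ini_content_alt (original_content : String) (character_name : String) (namespace_ : String) (remove_hash : Bool) : String :=
  let st := (pvSplitKeep original_content.toList).foldl pvPartStep ([], [], none)
  let secs := st.2.1 ++ (match st.2.2 with | none => [] | some c => [c])
  String.ofList (PySem.Chars.join []
    (pvNsLine character_name namespace_ :: (st.1 ++ secs.flatMap (pvEmitSec remove_hash))))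

-- ===== PRECONDITION & SPEC =====
def Spec_process_ini_content (original_content : String) (character_name : String) (namespace_ : String) (remove_hash : Bool) (out : String) : Prop := out = process_ini_content_alt original_content character_name namespace_ remove_hash
instance (original_content : String) (character_name : String) (namespace_ : String) (remove_hash : Bool) (out : String) : Decidable (Spec_process_ini_content original_content character_name namespace_ remove_hash out) := by unfold Spec_process_ini_content; infer_instance

-- ===== CLAIM (what is proved, stated in full; the proofs are below) =====
def Claim_equal_process_ini_content : Prop := ∀ (original_content : String) (character_name : String) (namespace_ : String) (remove_hash : Bool), Dom_process_ini_content original_content character_name namespace_ remove_hash → Spec_process_ini_content original_content character_name namespace_ remove_hash (process_ini_content original_content character_name namespace_ remove_hash)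

-- ===== LEMMAS AND PROOFS =====

-- Proof-side characterization of phase 1 as a right-to-left recursion.
def pvSplitB : List (List Char) → List (List Char) × List ((List Char) × List (List Char))
  | [] => ([], [])
  | l :: rest =>
    let (p, s) := pvSplitB rest
    if pvIsHeader l then ([], (l, p) :: s) else (l :: p, s)

def pvFinish
    (st : List (List Char) × List ((List Char) × List (List Char)) × Option ((List Char) × List (List Char))) :
    List (List Char) × List ((List Char) × List (List Char)) :=
  (st.1, st.2.1 ++ (match st.2.2 with | none => [] | some c => [c]))

lemma pvPart_some (ls : List (List Char)) :
    ∀ pre done h b,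
      pvFinish (ls.foldl pvPartStep (pre, done, some (h, b))) =
        (pre, done ++ (h, b ++ (pvSplitB ls).1) :: (pvSplitB ls).2) := by
  induction ls with
  | nil => intro pre done h b; simp [pvFinish, pvSplitB]
  | cons l rest ih =>
    intro pre done h b
    by_cases hl : pvIsHeader l
    · simp [List.foldl_cons, pvPartStep, hl, ih, pvSplitB]
    · simp [List.foldl_cons, pvPartStep, hl, ih, pvSplitB]

lemma pvPart_none (ls : List (List Char)) :
    ∀ pre done,
      pvFinish (ls.foldl pvPartStep (pre, done, none)) =
        (pre ++ (pvSplitB ls).1, done ++ (pvSplitB ls).2) := by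
  induction ls with
  | nil => intro pre done; simp [pvFinish, pvSplitB]
  | cons l rest ih =>
    intro pre done
    by_cases hl : pvIsHeader l
    · simp [List.foldl_cons, pvPartStep, hl, pvPart_some, pvSplitB]
    · simp [List.foldl_cons, pvPartStep, hl, ih, pvSplitB]

-- Accumulator-free form of A's loop.
def pvAEmit (remove_hash : Bool) : Bool → List (List Char) → List (List Char)
  | _, [] => []
  | inside, l :: rest =>
    let inside' := if pvIsHeader l then pvIsOverride l else inside
    (if remove_hash && inside' && pvIsSkip l then []
     else if pvIsOverride l then
       ["[CommandList".toList ++ PySem.List.slice (PySem.Chars.strip l) (some 1) (some (-1)) ++ "]\n".toList]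
     else [l]) ++ pvAEmit remove_hash inside' rest

lemma pvALoop_eq (remove_hash : Bool) (ls : List (List Char)) :
    ∀ inside acc, pvALoop remove_hash ls inside acc = acc ++ pvAEmit remove_hash inside ls := by
  induction ls with
  | nil => intro inside acc; simp [pvALoop, pvAEmit]
  | cons l rest ih =>
    intro inside acc
    simp only [pvALoop, pvAEmit, pvIsHeader, pvIsOverride, pvIsSkip, pvStrippedL]
    split_ifs with h1 h2 <;> simp [ih]

lemma pvOverride_header {l : List Char} (h : pvIsOverride l = true) : pvIsHeader l = true := by
  rw [pvIsOverride, Bool.or_eq_true] at h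
  rw [pvIsHeader, PySem.Chars.startswith_iff]
  rcases h with h | h <;>
    exact List.IsPrefix.trans (by decide) ((PySem.Chars.startswith_iff _ _).1 h)

lemma pvHeader_not_skip {l : List Char} (h : pvIsHeader l = true) : pvIsSkip l = false := by
  rw [pvIsHeader, PySem.Chars.startswith_iff] at h
  rcases h with ⟨t, ht⟩
  rw [pvIsSkip]
  simp only [List.any_eq_false]
  intro k hk
  fin_cases hk <;>
  · simp only [Bool.and_eq_true, not_and]
    intro hp _
    rw [PySem.Chars.startswith_iff] at hp
    rcases hp with ⟨u, hu⟩
    rw [← ht] at hu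
    simp at hu

lemma pvAEmit_split (remove_hash : Bool) (ls : List (List Char)) :
    ∀ inside,
      pvAEmit remove_hash inside ls =
        (if remove_hash && inside then (pvSplitB ls).1.filter (fun l => !pvIsSkip l) else (pvSplitB ls).1)
          ++ (pvSplitB ls).2.flatMap (pvEmitSec remove_hash) := by
  induction ls with
  | nil => intro inside; simp [pvAEmit, pvSplitB]
  | cons l rest ih =>
    intro inside
    by_cases hl : pvIsHeader l
    · have hsk := pvHeader_not_skip hl
      simp only [pvAEmit, pvSplitB, hl, if_true, hsk, Bool.and_false, Bool.false_eq_true,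
        if_false, ih (pvIsOverride l)]
      by_cases ho : pvIsOverride l
      · simp [pvEmitSec, ho]
      · simp [pvEmitSec, ho]
    · have ho : pvIsOverride l = false := by
        cases h : pvIsOverride l
        · rfl
        · exact absurd (pvOverride_header h) (by simp [hl])
      simp only [pvAEmit, pvSplitB, hl, if_false, ho, Bool.false_eq_true, ih inside]
      by_cases hin : remove_hash && inside
      · by_cases hsk : pvIsSkip l <;> simp [hin, hsk]
      · simp [hin]

-- ===== VERDICT (by name: the statement is the Claim_ definition above) =====
theorem process_ini_content_spec : Claim_equal_process_ini_content := by
  intro oc cn ns rh _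
  unfold Spec_process_ini_content process_ini_content process_ini_content_alt
  have hfin := pvPart_none (pvSplitKeep oc.toList) [] []
  have h1 : ((pvSplitKeep oc.toList).foldl pvPartStep ([], [], none)).1 = (pvSplitB (pvSplitKeep oc.toList)).1 := by
    have := congrArg Prod.fst hfin; simpa [pvFinish] using this
  have h2 : ((pvSplitKeep oc.toList).foldl pvPartStep ([], [], none)).2.1 ++
      (match ((pvSplitKeep oc.toList).foldl pvPartStep ([], [], none)).2.2 with
        | none => [] | some c => [c]) = (pvSplitB (pvSplitKeep oc.toList)).2 := by
    have := congrArg Prod.snd hfin; simpa [pvFinish] using this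
  rw [pvALoop_eq, pvAEmit_split]
  simp only [h1, h2, Bool.and_false, Bool.false_eq_true, if_false]
  rfl
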